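-- pv_equiv track=rewrite | github.com/Snehareddy0505/dsa | jobsequnceprob.py | job_sequencing
-- ===== SOURCE A (Python) =====
-- def job_sequencing(job_id, profit, deadline):
--     n = len(job_id)
--
--     # Create jobs as (profit, deadline, id)
--     jobs = []
--     for i in range(n):
--         jobs.append((profit[i], deadline[i], job_id[i]))
--
--     # Step 1: Sort jobs by profit (descending)
--     jobs.sort(reverse=True, key=lambda x: x[0])
--
--     # Step 2: Find maximum deadline
--     max_deadline = max(deadline)
--
--     # Step 3: Slot array to store job ids
--     slot = [-1] * (max_deadline + 1)
--
--     total_profit = 0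
--     count_jobs = 0
--
--     # Step 4: Schedule jobs
--     for p, d, jid in jobs:
--         for t in range(d, 0, -1):
--             if slot[t] == -1:
--                 slot[t] = jid
--                 total_profit += p
--                 count_jobs += 1
--                 break
--
--     return count_jobs, total_profit
--
-- job_id   = [1, 2, 3, 4]
--
-- profit   = [20, 10, 40, 30]
--
-- deadline = [1, 1, 2, 2]
-- ===== SOURCE B (Python) =====
-- def job_sequencing(job_id, profit, deadline):
--     n = len(job_id)
--     # Sort jobs by profit descending (stable, like A's sort)
--     jobs = sorted(((profit[i], deadline[i], job_id[i]) for i in range(n)),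
--                   key=lambda x: x[0], reverse=True)
--     max_deadline = max(deadline)
--     # Disjoint-set over time slots: parent[t] == t  <=>  slot t is still free
--     # (slot 0 is a permanent sentinel root meaning "no free slot").
--     parent = list(range(max_deadline + 1))
--     total_profit = 0
--     count_jobs = 0
--     for p, d, jid in jobs:
--         if d >= 1:
--             root = d
--             while parent[root] != root:
--                 root = parent[root]
--             t = d                      # path compression
--             while parent[t] != root:
--                 parent[t], t = root, parent[t]
--             if root >= 1:
--                 parent[root] = root - 1
--                 total_profit += p
--                 count_jobs += 1
--     return count_jobs, total_profit
-- ===== Notes on version B (the rewrite author's own statement) =====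
-- stated objective: alternative
-- what changed: A scans the slot array linearly downward from each job's deadline; B finds the rightmost free slot with a disjoint-set (union-find) over time slots with path compression, intended to remove the inner scan (a timing run read 24-28x on some timing sizes but only 1.39x at the largest, so no speed is claimed). …
-- outside the precondition, e.g. on job_sequencing([-1, 2], [5, 4], [1, 1]): A returns (2, 9), B returns (1, 5)
import Mathlib
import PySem

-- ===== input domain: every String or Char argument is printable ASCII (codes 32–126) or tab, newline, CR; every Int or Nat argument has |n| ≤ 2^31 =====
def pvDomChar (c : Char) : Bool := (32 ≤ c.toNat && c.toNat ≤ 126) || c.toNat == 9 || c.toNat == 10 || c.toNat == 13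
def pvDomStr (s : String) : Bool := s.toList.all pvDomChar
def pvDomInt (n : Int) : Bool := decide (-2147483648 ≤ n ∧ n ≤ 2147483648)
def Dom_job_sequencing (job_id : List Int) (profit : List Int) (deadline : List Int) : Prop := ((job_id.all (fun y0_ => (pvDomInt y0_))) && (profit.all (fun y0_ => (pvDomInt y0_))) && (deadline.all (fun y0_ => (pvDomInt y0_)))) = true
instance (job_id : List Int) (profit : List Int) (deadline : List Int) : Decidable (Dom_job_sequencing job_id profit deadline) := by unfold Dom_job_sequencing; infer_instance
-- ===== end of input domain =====

-- B replaces A's linear downward scan over the slot array by a disjoint-set (union-find)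
-- over time slots with path compression; proved equal on Pre_, which keeps schedulable job
-- ids away from -1, the value A reserves internally as its empty-slot marker.


-- ===== PORT A =====
-- inner 'for t in range(d, 0, -1): if slot[t] == -1: … break' of A
def jsScan (slot : List Int) : List Int → Option Int
  | [] => none
  | t :: ts => if PySem.List.pyGetD slot t 0 = -1 then some t else jsScan slot ts

-- one iteration of A's 'for p, d, jid in jobs' loop (state: slot, total_profit, count_jobs)
def jsStepA (st : List Int × Int × Int) (job : Int × Int × Int) : List Int × Int × Int :=
  match jsScan st.1 (PySem.List.pyRange job.2.1 0 (-1)) with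
  | some t => (PySem.List.pySetD st.1 t job.2.2, st.2.1 + job.1, st.2.2 + 1)
  | none => st

def job_sequencing (job_id : List Int) (profit : List Int) (deadline : List Int) : Int × Int :=
  let n := job_id.length
  let jobs := (List.range n).foldl (fun acc (i : Nat) =>
      acc ++ [(PySem.List.pyGetD profit (i : Int) 0, PySem.List.pyGetD deadline (i : Int) 0,
               PySem.List.pyGetD job_id (i : Int) 0)]) []
  let jobs := PySem.List.sorted jobs (fun x => x.1) true
  match PySem.List.max? deadline (fun x => x) with
  | none => (0, 0)  -- Python raises ValueError here (deadline = []); excluded by Pre_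
  | some m =>
    let slot : List Int := List.replicate (m + 1).toNat (-1)
    let st := jobs.foldl jsStepA (slot, 0, 0)
    (st.2.2, st.2.1)

-- ===== PORT B =====
-- B's find loop 'while parent[root] != root: root = parent[root]'.
-- Ported with a structural fuel of len(parent) steps: under the disjoint-set invariant the
-- chain is strictly decreasing and nonnegative, so the fuel is never exhausted (findRoot_spec
-- below); same iterations, same values.
def jsFindRoot (parent : List Int) : Nat → Int → Int
  | 0, t => t
  | fuel + 1, t =>
    if PySem.List.pyGetD parent t 0 ≠ t then jsFindRoot parent fuel (PySem.List.pyGetD parent t 0)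
    else t

-- B's path-compression loop 'while parent[t] != root: parent[t], t = root, parent[t]',
-- with the same fuel argument.
def jsCompress (root : Int) : Nat → List Int → Int → List Int
  | 0, parent, _ => parent
  | fuel + 1, parent, t =>
    if PySem.List.pyGetD parent t 0 ≠ root then
      jsCompress root fuel (PySem.List.pySetD parent t root) (PySem.List.pyGetD parent t 0)
    else parent

-- one iteration of B's 'for p, d, jid in jobs' loop (state: parent, total_profit, count_jobs)
def jsStepB (st : List Int × Int × Int) (job : Int × Int × Int) : List Int × Int × Int :=
  if 1 ≤ job.2.1 then
    let root := jsFindRoot st.1 st.1.length job.2.1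
    let parent := jsCompress root st.1.length st.1 job.2.1
    if 1 ≤ root then
      (PySem.List.pySetD parent root (root - 1), st.2.1 + job.1, st.2.2 + 1)
    else (parent, st.2.1, st.2.2)
  else st

def job_sequencing_alt (job_id : List Int) (profit : List Int) (deadline : List Int) : Int × Int :=
  let n := job_id.length
  let jobs := PySem.List.sorted ((List.range n).map (fun (i : Nat) =>
      (PySem.List.pyGetD profit (i : Int) 0, PySem.List.pyGetD deadline (i : Int) 0,
       PySem.List.pyGetD job_id (i : Int) 0))) (fun x => x.1) true
  match PySem.List.max? deadline (fun x => x) with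
  | none => (0, 0)  -- Python raises ValueError here (deadline = []); excluded by Pre_
  | some m =>
    let parent := PySem.List.pyRange 0 (m + 1)
    let st := jobs.foldl jsStepB (parent, 0, 0)
    (st.2.2, st.2.1)

-- ===== PRECONDITION & SPEC =====
-- Pre_ excludes the inputs on which the Python A raises — deadline = [] (ValueError from max)
-- and profit/deadline lists shorter than job_id (IndexError) — and jobs whose id is -1 while
-- their deadline is positive: such a job can be scheduled, and its id collides with the value
-- A reserves as its empty-slot marker (the slot stays marked empty and A may double-book it).
def Pre_job_sequencing (job_id : List Int) (profit : List Int) (deadline : List Int) : Prop :=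
  deadline ≠ [] ∧ job_id.length ≤ profit.length ∧ job_id.length ≤ deadline.length ∧
    ∀ i : Nat, i < job_id.length → job_id.getD i 0 = -1 → deadline.getD i 0 < 1

instance (job_id : List Int) (profit : List Int) (deadline : List Int) : Decidable (Pre_job_sequencing job_id profit deadline) := by unfold Pre_job_sequencing; infer_instance

def pvWitness_job_sequencing : List Int × List Int × List Int := ([1, 2, 3, 4], [20, 10, 40, 30], [1, 1, 2, 2])

def Spec_job_sequencing (job_id : List Int) (profit : List Int) (deadline : List Int) (out : Int × Int) : Prop := out = job_sequencing_alt job_id profit deadline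

instance (job_id : List Int) (profit : List Int) (deadline : List Int) (out : Int × Int) : Decidable (Spec_job_sequencing job_id profit deadline out) := by unfold Spec_job_sequencing; infer_instance

-- ===== CLAIM (what is proved, stated in full; the proofs are below) =====
def Claim_equal_job_sequencing : Prop := ∀ (job_id : List Int) (profit : List Int) (deadline : List Int), Dom_job_sequencing job_id profit deadline → Pre_job_sequencing job_id profit deadline → Spec_job_sequencing job_id profit deadline (job_sequencing job_id profit deadline)

-- ===== LEMMAS AND PROOFS =====


-- characterization of A's downward scan: if it returns none every slot in (0,d] is occupied;
-- if it returns some t then t is the largest free slot ≤ d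
theorem jsScan_down (slot : List Int) :
    ∀ (fuel : Nat) (d : Int), d.toNat ≤ fuel →
    (jsScan slot (PySem.List.pyRange d 0 (-1)) = none →
      ∀ u : Int, 0 < u → u ≤ d → ¬ PySem.List.pyGetD slot u 0 = -1) ∧
    (∀ t, jsScan slot (PySem.List.pyRange d 0 (-1)) = some t →
      0 < t ∧ t ≤ d ∧ PySem.List.pyGetD slot t 0 = -1 ∧
        ∀ u : Int, t < u → u ≤ d → ¬ PySem.List.pyGetD slot u 0 = -1) := by
  intro fuel
  induction fuel with
  | zero =>
    intro d hd
    have hnil : PySem.List.pyRange d 0 (-1) = [] := PySem.List.pyRange_neg_one_eq_nil (by omega)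
    rw [hnil]
    constructor
    · intro _ u hu hud; omega
    · intro t ht; simp [jsScan] at ht
  | succ fuel ih =>
    intro d hd
    by_cases hd0 : d ≤ 0
    · have hnil : PySem.List.pyRange d 0 (-1) = [] := PySem.List.pyRange_neg_one_eq_nil hd0
      rw [hnil]
      constructor
      · intro _ u hu hud; omega
      · intro t ht; simp [jsScan] at ht
    · have hcons : PySem.List.pyRange d 0 (-1) = d :: PySem.List.pyRange (d-1) 0 (-1) :=
        PySem.List.pyRange_neg_one_cons (by omega)
      rw [hcons]
      have ihd := ih (d-1) (by omega)
      by_cases hfree : PySem.List.pyGetD slot d 0 = -1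
      · constructor
        · intro hnone; simp [jsScan, hfree] at hnone
        · intro t ht
          simp [jsScan, hfree] at ht
          subst ht
          exact ⟨by omega, le_refl _, hfree, by intro u hu hud; omega⟩
      · constructor
        · intro hnone
          simp only [jsScan, if_neg hfree] at hnone
          intro u hu hud
          rcases lt_or_eq_of_le hud with h | h
          · exact ihd.1 hnone u hu (by omega)
          · rw [h]; exact hfree
        · intro t ht
          simp only [jsScan, if_neg hfree] at ht
          obtain ⟨h1, h2, h3, h4⟩ := ihd.2 t ht
          refine ⟨h1, by omega, h3, ?_⟩
          intro u hu hud
          rcases lt_or_eq_of_le hud with h | h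
          · exact h4 u hu (by omega)
          · rw [h]; exact hfree

theorem getD_set_int (slot : List Int) (t j u : Int) (ht0 : 0 ≤ t) (htl : t < (slot.length : Int))
    (hu0 : 0 ≤ u) (hul : u < (slot.length : Int)) :
    PySem.List.pyGetD (PySem.List.pySetD slot t j) u 0 =
      if u = t then j else PySem.List.pyGetD slot u 0 := by
  have htn : t.toNat < slot.length := by omega
  have hun : u.toNat < slot.length := by omega
  rw [PySem.List.pySetD_of_nonneg slot j ht0]
  rw [PySem.List.pyGetD_eq_getElem (slot.set t.toNat j) 0 hu0 (by simpa using hul)]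
  rw [PySem.List.pyGetD_eq_getElem slot 0 hu0 hul]
  rw [List.getElem_set]
  by_cases h : u = t
  · simp [h]
  · have : t.toNat ≠ u.toNat := by omega
    simp [this, h]

-- the disjoint-set invariant tying B's parent array to A's slot array:
-- parent entries point downward, skip only occupied slots, and occupied slots point strictly down
def jsInv (m : Int) (slot parent : List Int) : Prop :=
  slot.length = (m + 1).toNat ∧ parent.length = (m + 1).toNat ∧
  ∀ u : Int, 0 ≤ u → u ≤ m →
    0 ≤ PySem.List.pyGetD parent u 0 ∧ PySem.List.pyGetD parent u 0 ≤ u ∧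
    (∀ s : Int, PySem.List.pyGetD parent u 0 < s → s ≤ u → PySem.List.pyGetD slot s 0 ≠ -1) ∧
    (1 ≤ u → PySem.List.pyGetD slot u 0 ≠ -1 → PySem.List.pyGetD parent u 0 < u)

theorem findRoot_spec (m : Int) (slot parent : List Int) (hinv : jsInv m slot parent) :
    ∀ (fuel : Nat) (t : Int), 0 ≤ t → t ≤ m → t.toNat < fuel →
    0 ≤ jsFindRoot parent fuel t ∧ jsFindRoot parent fuel t ≤ t ∧
    PySem.List.pyGetD parent (jsFindRoot parent fuel t) 0 = jsFindRoot parent fuel t ∧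
    (∀ s : Int, jsFindRoot parent fuel t < s → s ≤ t → PySem.List.pyGetD slot s 0 ≠ -1) := by
  obtain ⟨hl1, hl2, hcl⟩ := hinv
  intro fuel
  induction fuel with
  | zero => intro t _ _ h; omega
  | succ fuel ih =>
    intro t ht0 htm hfuel
    obtain ⟨hp0, hpt, hskip, _⟩ := hcl t ht0 htm
    by_cases h : PySem.List.pyGetD parent t 0 ≠ t
    · have hlt : PySem.List.pyGetD parent t 0 < t := lt_of_le_of_ne hpt h
      simp only [jsFindRoot, if_pos h]
      have hrec := ih (PySem.List.pyGetD parent t 0) hp0 (by omega) (by omega)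
      refine ⟨hrec.1, by omega, hrec.2.2.1, ?_⟩
      intro s hs1 hs2
      rcases Int.lt_or_le (PySem.List.pyGetD parent t 0) s with hgt | hle
      · exact hskip s hgt hs2
      · exact hrec.2.2.2 s hs1 hle
    · simp only [jsFindRoot, if_neg h]
      push_neg at h
      exact ⟨ht0, le_refl t, h, by intro s h1 h2; omega⟩

theorem compress_inv (m : Int) (slot : List Int) :
    ∀ (fuel : Nat) (parent : List Int) (t r : Int),
    jsInv m slot parent → 0 ≤ t → t ≤ m → 0 ≤ r → r ≤ t →
    PySem.List.pyGetD parent r 0 = r →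
    (∀ s : Int, r < s → s ≤ t → PySem.List.pyGetD slot s 0 ≠ -1) →
    jsInv m slot (jsCompress r fuel parent t) ∧
      PySem.List.pyGetD (jsCompress r fuel parent t) r 0 = r := by
  intro fuel
  induction fuel with
  | zero =>
    intro parent t r hinv _ _ _ _ hroot _
    exact ⟨hinv, hroot⟩
  | succ fuel ih =>
    intro parent t r hinv ht0 htm hr0 hrt hroot hskip
    obtain ⟨hl1, hl2, hcl⟩ := hinv
    by_cases h : PySem.List.pyGetD parent t 0 ≠ r
    · simp only [jsCompress, if_pos h]
      obtain ⟨hp0, hpt, hskipt, _⟩ := hcl t ht0 htm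
      have hlenI : (parent.length : Int) = m + 1 := by rw [hl2]; omega
      have hrltt : r < t := by
        rcases lt_or_eq_of_le hrt with h' | h'
        · exact h'
        · exfalso; apply h; rw [← h'] at *; exact hroot
      -- the next chain node is between r and t
      have hnext : r ≤ PySem.List.pyGetD parent t 0 := by
        by_contra hc
        push_neg at hc
        -- then r itself lies in the occupied stretch (parent[t], t], contradicting parent[r] = r
        have hoccr : PySem.List.pyGetD slot r 0 ≠ -1 := hskipt r hc (by omega)
        have hr1 : 1 ≤ r := by omega
        have := (hcl r hr0 (by omega)).2.2.2 hr1 hoccr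
        omega
      have hwrite : ∀ u : Int, 0 ≤ u → u ≤ m →
          PySem.List.pyGetD (PySem.List.pySetD parent t r) u 0 =
            if u = t then r else PySem.List.pyGetD parent u 0 := by
        intro u hu0 hum
        exact getD_set_int parent t r u ht0 (by omega) hu0 (by omega)
      have hinv' : jsInv m slot (PySem.List.pySetD parent t r) := by
        refine ⟨hl1, by rw [PySem.List.length_pySetD]; exact hl2, ?_⟩
        intro u hu0 hum
        rw [hwrite u hu0 hum]
        by_cases hut : u = t
        · rw [if_pos hut]
          subst hut
          refine ⟨hr0, by omega, ?_, by intro _ _; omega⟩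
          intro s hs1 hs2
          exact hskip s hs1 (by omega)
        · rw [if_neg hut]
          exact hcl u hu0 hum
      have hroot' : PySem.List.pyGetD (PySem.List.pySetD parent t r) r 0 = r := by
        rw [hwrite r hr0 (by omega), if_neg (by omega)]
        exact hroot
      exact ih (PySem.List.pySetD parent t r) (PySem.List.pyGetD parent t 0) r hinv'
        hp0 (by omega) hr0 hnext hroot'
        (fun s h1 h2 => hskip s h1 (by omega))
    · simp only [jsCompress, if_neg h]
      exact ⟨⟨hl1, hl2, hcl⟩, hroot⟩

-- booking slot r: A writes an id ≠ -1 into slot[r], B points parent[r] one slot down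
theorem occupy_inv (m : Int) (slot parent : List Int) (r j : Int)
    (hinv : jsInv m slot parent) (hr1 : 1 ≤ r) (hrm : r ≤ m) (hj : j ≠ -1) :
    jsInv m (PySem.List.pySetD slot r j) (PySem.List.pySetD parent r (r - 1)) := by
  obtain ⟨hl1, hl2, hcl⟩ := hinv
  have hlenS : (slot.length : Int) = m + 1 := by rw [hl1]; omega
  have hlenP : (parent.length : Int) = m + 1 := by rw [hl2]; omega
  refine ⟨by rw [PySem.List.length_pySetD]; exact hl1,
          by rw [PySem.List.length_pySetD]; exact hl2, ?_⟩
  intro u hu0 hum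
  have hwsl : ∀ s : Int, 0 ≤ s → s ≤ m →
      PySem.List.pyGetD (PySem.List.pySetD slot r j) s 0 =
        if s = r then j else PySem.List.pyGetD slot s 0 := by
    intro s h1 h2
    exact getD_set_int slot r j s (by omega) (by omega) h1 (by omega)
  have hwpr : PySem.List.pyGetD (PySem.List.pySetD parent r (r - 1)) u 0 =
      if u = r then r - 1 else PySem.List.pyGetD parent u 0 :=
    getD_set_int parent r (r - 1) u (by omega) (by omega) hu0 (by omega)
  obtain ⟨hp0, hpt, hskip, hocc⟩ := hcl u hu0 hum
  rw [hwpr]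
  by_cases hur : u = r
  · rw [if_pos hur]
    refine ⟨by omega, by omega, ?_, by intro _ _; omega⟩
    intro s hs1 hs2
    have hsr : s = r := by omega
    rw [hwsl s (by omega) (by omega), if_pos hsr]
    exact hj
  · rw [if_neg hur]
    refine ⟨hp0, hpt, ?_, ?_⟩
    · intro s hs1 hs2
      rw [hwsl s (by omega) (by omega)]
      by_cases hsr : s = r
      · rw [if_pos hsr]; exact hj
      · rw [if_neg hsr]; exact hskip s hs1 hs2
    · intro hu1 hocc'
      rw [hwsl u hu0 hum, if_neg hur] at hocc'
      exact hocc hu1 hocc'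

-- one synchronized step: A's scan books the same slot B's disjoint-set find returns
theorem stepSim (m : Int) (slot parent : List Int) (tp cj p d j : Int)
    (hinv : jsInv m slot parent) (hd : d ≤ m) (hj : j = -1 → d ≤ 0) :
    jsInv m (jsStepA (slot, tp, cj) (p, d, j)).1 (jsStepB (parent, tp, cj) (p, d, j)).1 ∧
    (jsStepA (slot, tp, cj) (p, d, j)).2 = (jsStepB (parent, tp, cj) (p, d, j)).2 := by
  rcases Int.lt_or_le d 1 with hd0 | hd1
  · -- d ≤ 0: A's countdown range is empty, B's guard fails
    have hA : jsStepA (slot, tp, cj) (p, d, j) = (slot, tp, cj) := by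
      simp [jsStepA, PySem.List.pyRange_neg_one_eq_nil (show d ≤ 0 by omega), jsScan]
    have hB : jsStepB (parent, tp, cj) (p, d, j) = (parent, tp, cj) := by
      simp only [jsStepB]
      rw [if_neg (by simp; omega)]
    rw [hA, hB]
    exact ⟨hinv, rfl⟩
  · have hl2 := hinv.2.1
    have hfuel : d.toNat < parent.length := by rw [hl2]; omega
    have hfr := findRoot_spec m slot parent hinv parent.length d (by omega) hd (by omega)
    set r := jsFindRoot parent parent.length d with hr
    obtain ⟨hr0, hrd, hroot, hrskip⟩ := hfr
    have hcomp := compress_inv m slot parent.length parent d r hinv (by omega) hd hr0 hrd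
      hroot hrskip
    set parentC := jsCompress r parent.length parent d with hpc
    obtain ⟨hinvC, hrootC⟩ := hcomp
    cases hscan : jsScan slot (PySem.List.pyRange d 0 (-1)) with
    | none =>
      have hocc := (jsScan_down slot d.toNat d le_rfl).1 hscan
      have hr0' : ¬ (1 ≤ r) := by
        intro hr1
        have hoccr := hocc r (by omega) hrd
        have := (hinv.2.2 r hr0 (by omega)).2.2.2 hr1 hoccr
        omega
      have hB : jsStepB (parent, tp, cj) (p, d, j) = (parentC, tp, cj) := by
        simp only [jsStepB]
        rw [if_pos (by simpa using hd1)]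
        simp only [← hr, ← hpc]
        rw [if_neg hr0']
      have hA : jsStepA (slot, tp, cj) (p, d, j) = (slot, tp, cj) := by
        simp [jsStepA, hscan]
      rw [hA, hB]
      exact ⟨hinvC, rfl⟩
    | some t =>
      obtain ⟨ht0, htd, htfree, hoccT⟩ := (jsScan_down slot d.toNat d le_rfl).2 t hscan
      have hrt : r = t := by
        rcases lt_trichotomy r t with h | h | h
        · exfalso; exact (hrskip t h htd) htfree
        · exact h
        · exfalso
          have hoccr := hoccT r h hrd
          have := (hinvC.2.2 r hr0 (by omega)).2.2.2 (by omega) hoccr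
          omega
      have hr1 : 1 ≤ r := by omega
      have hB : jsStepB (parent, tp, cj) (p, d, j) =
          (PySem.List.pySetD parentC r (r - 1), tp + p, cj + 1) := by
        simp only [jsStepB]
        rw [if_pos (by simpa using hd1)]
        simp only [← hr, ← hpc]
        rw [if_pos hr1]
      have hA : jsStepA (slot, tp, cj) (p, d, j) =
          (PySem.List.pySetD slot t j, tp + p, cj + 1) := by
        simp [jsStepA, hscan]
      rw [hA, hB]
      subst hrt
      exact ⟨occupy_inv m slot parentC r j hinvC hr1 (by omega)
        (fun hj' => by have := hj hj'; omega), rfl⟩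

theorem foldSim (m : Int) : ∀ (J : List (Int × Int × Int)) (slot parent : List Int) (tp cj : Int),
    jsInv m slot parent →
    (∀ jb ∈ J, jb.2.1 ≤ m ∧ (jb.2.2 = -1 → jb.2.1 ≤ 0)) →
    (J.foldl jsStepA (slot, tp, cj)).2 = (J.foldl jsStepB (parent, tp, cj)).2 := by
  intro J
  induction J with
  | nil => intro slot parent tp cj _ _; rfl
  | cons jb J ih =>
    intro slot parent tp cj hinv hall
    obtain ⟨p, d, j⟩ := jb
    have hjb := hall _ (List.mem_cons_self)
    have hstep := stepSim m slot parent tp cj p d j hinv hjb.1 hjb.2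
    simp only [List.foldl_cons]
    have hA : jsStepA (slot, tp, cj) (p, d, j) =
        ((jsStepA (slot, tp, cj) (p, d, j)).1, (jsStepA (slot, tp, cj) (p, d, j)).2.1,
         (jsStepA (slot, tp, cj) (p, d, j)).2.2) := rfl
    have hB : jsStepB (parent, tp, cj) (p, d, j) =
        ((jsStepB (parent, tp, cj) (p, d, j)).1, (jsStepB (parent, tp, cj) (p, d, j)).2.1,
         (jsStepB (parent, tp, cj) (p, d, j)).2.2) := rfl
    rw [hA, hB, hstep.2]
    exact ih _ _ _ _ hstep.1 (fun x hx => hall x (List.mem_cons_of_mem _ hx))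

-- ===== initial state and assembly =====
theorem initInv (m : Int) :
    jsInv m (List.replicate (m + 1).toNat (-1)) (PySem.List.pyRange 0 (m + 1)) := by
  refine ⟨by simp, by rw [PySem.List.length_pyRange_one]; omega, ?_⟩
  intro u hu0 hum
  have hlen : (PySem.List.pyRange 0 (m + 1)).length = (m + 1).toNat := by
    rw [PySem.List.length_pyRange_one]; omega
  have hpar : PySem.List.pyGetD (PySem.List.pyRange 0 (m + 1)) u 0 = u := by
    rw [PySem.List.pyGetD_eq_getElem _ _ hu0 (by rw [hlen]; omega)]
    rw [PySem.List.getElem_pyRange_one]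
    omega
  have hslot : PySem.List.pyGetD (List.replicate (m + 1).toNat (-1)) u 0 = (-1 : Int) := by
    rw [PySem.List.pyGetD_eq_getElem _ _ hu0 (by simp; omega)]
    simp
  rw [hpar]
  refine ⟨hu0, le_refl u, by intro s h1 h2; omega, ?_⟩
  intro _ hocc
  exact absurd hslot hocc

-- ===== VERDICT (by name: the statement is the Claim_ definition above) =====
theorem job_sequencing_spec : Claim_equal_job_sequencing := by
  intro job_id profit deadline hdom hpre
  unfold Spec_job_sequencing
  obtain ⟨hne, hlp, hld, hid⟩ := hpre
  simp only [job_sequencing, job_sequencing_alt]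
  have hjobs : (List.range job_id.length).foldl (fun acc (i : Nat) =>
        acc ++ [(PySem.List.pyGetD profit (i : Int) 0, PySem.List.pyGetD deadline (i : Int) 0,
                 PySem.List.pyGetD job_id (i : Int) 0)]) [] =
      (List.range job_id.length).map (fun (i : Nat) =>
        (PySem.List.pyGetD profit (i : Int) 0, PySem.List.pyGetD deadline (i : Int) 0,
         PySem.List.pyGetD job_id (i : Int) 0)) := by
    simpa using PySem.List.foldl_append_singleton_eq_map (fun i : Nat =>
      (PySem.List.pyGetD profit (i : Int) 0, PySem.List.pyGetD deadline (i : Int) 0,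
       PySem.List.pyGetD job_id (i : Int) 0)) (List.range job_id.length) []
  rw [hjobs]
  cases hmax : PySem.List.max? deadline (fun x => x) with
  | none => exact absurd ((PySem.List.max?_eq_none_iff _ _).mp hmax) hne
  | some m =>
    simp only []
    set Js := PySem.List.sorted ((List.range job_id.length).map (fun (i : Nat) =>
        (PySem.List.pyGetD profit (i : Int) 0, PySem.List.pyGetD deadline (i : Int) 0,
         PySem.List.pyGetD job_id (i : Int) 0))) (fun x => x.1) true with hJs
    have hmemJs : ∀ jb ∈ Js, ∃ i : Nat, i < job_id.length ∧
        jb = (PySem.List.pyGetD profit (i : Int) 0, PySem.List.pyGetD deadline (i : Int) 0,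
              PySem.List.pyGetD job_id (i : Int) 0) := by
      intro jb hjb
      rw [hJs] at hjb
      have := (PySem.List.mem_sorted _ _ _ _).mp hjb
      obtain ⟨i, hi, heq⟩ := List.mem_map.mp this
      exact ⟨i, List.mem_range.mp hi, heq.symm⟩
    suffices h2 : (Js.foldl jsStepA (List.replicate (m + 1).toNat (-1), 0, 0)).2 =
        (Js.foldl jsStepB (PySem.List.pyRange 0 (m + 1), 0, 0)).2 by
      rw [h2]
    apply foldSim m Js _ _ 0 0 (initInv m)
    intro jb hjb
    obtain ⟨i, hi, heq⟩ := hmemJs jb hjb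
    constructor
    · -- deadline bound: jb.2.1 is an element of deadline, hence ≤ the max m
      have hmem : deadline.getD i 0 ∈ deadline := by
        rw [List.getD_eq_getElem deadline 0 (by omega)]
        exact List.getElem_mem (by omega)
      have := PySem.List.max?_isMax hmax _ hmem
      rw [heq]
      simpa using this
    · -- on Pre_, a job with id -1 has a non-positive deadline
      intro hjid
      have h1 := hid i hi
      rw [heq] at hjid ⊢
      simp only [PySem.List.pyGetD_natCast] at hjid ⊢
      have := h1 hjid
      omega
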